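-- pv_equiv track=rewrite | github.com/TinyTapeout/sky130-rom-experiments | rom_utils/rom_burn.py | chunk_data
-- ===== SOURCE A (Python) =====
-- from typing import List, Set
--
-- def chunk_data(cols: int, word_bits: int, words_per_row: int, raw_data: List[int]):
--     """
--     Chunks a flat list of bits into rows based on the calculated ROM sizes. Handles scrambling of data.
--     Source: compile/rom_config.py from OpenRAM compiler
--     """
--     bits_per_row = cols
--
--     chunked_data = []
--
--     for i in range(0, len(raw_data), bits_per_row):
--         row_data = raw_data[i : i + bits_per_row]
--         if len(row_data) < bits_per_row:
--             row_data = [0] * (bits_per_row - len(row_data)) + row_data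
--         chunked_data.append(row_data)
--
--     scrambled_chunked = []
--
--     for row_data in chunked_data:
--         scambled_data = []
--         for bit in range(word_bits):
--             for word in range(words_per_row):
--                 scambled_data.append(row_data[bit + word * word_bits])
--         scrambled_chunked.append(scambled_data)
--     return scrambled_chunked
-- ===== SOURCE B (Python) =====
-- from typing import List
--
-- def chunk_data(cols: int, word_bits: int, words_per_row: int, raw_data: List[int]):
--     # One pass: slice each padded row into its words, then emit the transpose of the
--     # word matrix (zip) flattened -- no bit/word index arithmetic. With a nonpositive
--     # word width or word count there are no words, so the scrambled row is empty.
--     scrambled = []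
--     for i in range(0, len(raw_data), cols):
--         row = raw_data[i : i + cols]
--         row = [0] * (cols - len(row)) + row
--         if word_bits <= 0 or words_per_row <= 0:
--             scrambled.append([])
--         else:
--             words = [row[w * word_bits : (w + 1) * word_bits] for w in range(words_per_row)]
--             scrambled.append([b for col in zip(*words) for b in col])
--     return scrambled
-- ===== Notes on version B (the rewrite author's own statement) =====
-- stated objective: alternative
-- what changed: B replaces A's two staged passes with nested bit/word index arithmetic by a single pass that slices each padded row into its words and emits the flattened transpose of the word matrix (Python zip(*words)).
import Mathlib
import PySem

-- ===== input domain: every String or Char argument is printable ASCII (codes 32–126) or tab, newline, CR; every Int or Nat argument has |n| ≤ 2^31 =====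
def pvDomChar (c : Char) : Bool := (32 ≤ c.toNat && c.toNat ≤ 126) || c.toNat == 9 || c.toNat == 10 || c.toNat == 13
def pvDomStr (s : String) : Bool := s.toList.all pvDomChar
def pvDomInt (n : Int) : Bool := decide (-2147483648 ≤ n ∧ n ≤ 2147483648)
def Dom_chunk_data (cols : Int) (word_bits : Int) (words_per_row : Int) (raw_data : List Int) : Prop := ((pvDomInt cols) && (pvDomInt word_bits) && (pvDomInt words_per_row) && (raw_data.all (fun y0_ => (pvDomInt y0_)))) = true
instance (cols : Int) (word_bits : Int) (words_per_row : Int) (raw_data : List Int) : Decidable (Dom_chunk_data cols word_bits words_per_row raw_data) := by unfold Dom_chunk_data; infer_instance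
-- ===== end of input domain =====

-- B slices each padded row into its words and emits the flattened transpose of the word
-- matrix (Python zip) in a single pass, instead of A's staged passes with nested
-- bit/word index arithmetic (objective: alternative decomposition; same cost).

-- ===== PORT A =====
-- literal transliteration: chunking loop with append, then nested scramble loops with append
def chunk_data (cols : Int) (word_bits : Int) (words_per_row : Int) (raw_data : List Int) : List (List Int) :=
  let bits_per_row := cols
  let chunked_data : List (List Int) :=
    (PySem.List.pyRange 0 raw_data.length bits_per_row).foldl (fun acc i =>
      let row_data := PySem.List.slice raw_data (some i) (some (i + bits_per_row))
      let row_data :=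
        if (row_data.length : Int) < bits_per_row then
          List.replicate (bits_per_row - (row_data.length : Int)).toNat 0 ++ row_data
        else row_data
      acc ++ [row_data]) []
  chunked_data.foldl (fun acc row_data =>
    let scambled_data : List Int :=
      (PySem.List.pyRange 0 word_bits 1).foldl (fun s bit =>
        (PySem.List.pyRange 0 words_per_row 1).foldl (fun s word =>
          s ++ [PySem.List.pyGetD row_data (bit + word * word_bits) 0]) s) []
    acc ++ [scambled_data]) []

-- ===== PORT B =====
-- zip(*words) flattened: emit all heads, recurse on the tails; stop when any list is empty
def pyZipFlat : List (List Int) → List Int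
  | [] => []
  | l :: rest =>
    if h : (l :: rest).any List.isEmpty then []
    else ((l :: rest).map (fun w => w.headD 0)) ++ pyZipFlat ((l :: rest).map List.tail)
termination_by ls => (ls.headD []).length
decreasing_by
  simp only [List.any_cons, Bool.or_eq_true, List.isEmpty_iff, not_or] at h
  simp only [List.map_cons, List.headD_cons]
  cases l with
  | nil => exact absurd rfl h.1
  | cons x xs => simp

-- literal transliteration of Source B: one loop; slice row, pad, then either the degenerate
-- empty row (no words) or cut into words and zip-flatten
def chunk_data_alt (cols : Int) (word_bits : Int) (words_per_row : Int) (raw_data : List Int) : List (List Int) :=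
  (PySem.List.pyRange 0 raw_data.length cols).foldl (fun acc i =>
    let row := PySem.List.slice raw_data (some i) (some (i + cols))
    let row := List.replicate (cols - (row.length : Int)).toNat 0 ++ row
    if word_bits ≤ 0 ∨ words_per_row ≤ 0 then acc ++ [[]]
    else
      let words := (PySem.List.pyRange 0 words_per_row 1).map (fun w =>
        PySem.List.slice row (some (w * word_bits)) (some ((w + 1) * word_bits)))
      acc ++ [pyZipFlat words]) []

-- ===== PRECONDITION & SPEC =====
-- Pre_ excludes exactly the inputs where the Python A raises: cols = 0 (ValueError from
-- range step 0) and, when rows exist, positive word geometry overrunning a row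
-- (IndexError when word_bits*words_per_row > cols).
def Pre_chunk_data (cols : Int) (word_bits : Int) (words_per_row : Int) (raw_data : List Int) : Prop :=
  cols ≠ 0 ∧ (0 < cols → raw_data ≠ [] →
    word_bits ≤ 0 ∨ words_per_row ≤ 0 ∨ word_bits * words_per_row ≤ cols)
instance (cols : Int) (word_bits : Int) (words_per_row : Int) (raw_data : List Int) : Decidable (Pre_chunk_data cols word_bits words_per_row raw_data) := by unfold Pre_chunk_data; infer_instance

def pvWitness_chunk_data : Int × Int × Int × List Int := (4, 2, 2, [1, 0, 1, 1, 0, 1])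

def Spec_chunk_data (cols : Int) (word_bits : Int) (words_per_row : Int) (raw_data : List Int) (out : List (List Int)) : Prop := out = chunk_data_alt cols word_bits words_per_row raw_data
instance (cols : Int) (word_bits : Int) (words_per_row : Int) (raw_data : List Int) (out : List (List Int)) : Decidable (Spec_chunk_data cols word_bits words_per_row raw_data out) := by unfold Spec_chunk_data; infer_instance

-- ===== CLAIM (what is proved, stated in full; the proofs are below) =====
def Claim_equal_chunk_data : Prop := ∀ (cols : Int) (word_bits : Int) (words_per_row : Int) (raw_data : List Int), Dom_chunk_data cols word_bits words_per_row raw_data → Pre_chunk_data cols word_bits words_per_row raw_data → Spec_chunk_data cols word_bits words_per_row raw_data (chunk_data cols word_bits words_per_row raw_data)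

-- ===== LEMMAS AND PROOFS =====

theorem pyZipFlat_nil_of_mem (ls : List (List Int)) (h : [] ∈ ls) : pyZipFlat ls = [] := by
  cases ls with
  | nil => simp at h
  | cons l rest =>
    rw [pyZipFlat]
    rw [dif_pos (by simp only [List.any_eq_true]; exact ⟨[], h, rfl⟩)]

theorem tail_getD (w : List Int) (b : Nat) (d : Int) : w.tail.getD b d = w.getD (b + 1) d := by
  cases w <;> simp [List.getD]

theorem headD_getD (w : List Int) (d : Int) : w.headD d = w.getD 0 d := by
  cases w <;> simp

theorem pyZipFlat_uniform (m : Nat) : ∀ (ls : List (List Int)), ls ≠ [] →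
    (∀ w ∈ ls, w.length = m) →
    pyZipFlat ls = (List.range m).flatMap (fun b => ls.map (fun w => w.getD b 0)) := by
  induction m with
  | zero =>
    intro ls hne hlen
    cases ls with
    | nil => exact absurd rfl hne
    | cons l rest =>
      simp only [List.range_zero, List.flatMap_nil]
      exact pyZipFlat_nil_of_mem _ (by
        have := hlen l (by simp)
        have : l = [] := List.eq_nil_of_length_eq_zero this
        simp [this])
  | succ m ih =>
    intro ls hne hlen
    cases ls with
    | nil => exact absurd rfl hne
    | cons l rest =>
      rw [pyZipFlat]
      rw [dif_neg (by
        simp only [List.any_eq_true, not_exists, not_and]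
        intro w hw
        have := hlen w hw
        simp [List.isEmpty_iff]
        intro hw0; rw [hw0] at this; simp at this)]
      rw [ih ((l :: rest).map List.tail) (by simp) (by
        intro w hw
        simp only [List.mem_map] at hw
        obtain ⟨v, hv, rfl⟩ := hw
        have := hlen v hv
        simp [List.length_tail, this])]
      rw [List.range_succ_eq_map]
      simp only [List.flatMap_cons, List.flatMap_map, List.map_map]
      congr 1
      · exact List.map_congr_left (fun w _ => headD_getD w 0)
      · apply List.flatMap_congr
        intro b _
        exact List.map_congr_left (fun w _ => tail_getD w b 0)

-- range(0, n, c) with negative step c is empty (n ≥ 0)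
theorem pyRange_zero_nonpos (n : Nat) {c : Int} (h : c < 0) : PySem.List.pyRange 0 (n : Int) c = [] := by
  unfold PySem.List.pyRange
  rw [if_neg (by omega), if_neg (by omega), if_neg (by omega)]
  simp

-- with no words (nonpositive width or count) A's nested loops produce the empty row
theorem scramble_nil (wb wpr : Int) (row : List Int) (hdeg : wb ≤ 0 ∨ wpr ≤ 0) :
    (PySem.List.pyRange 0 wb 1).foldl (fun s bit =>
      s ++ (PySem.List.pyRange 0 wpr 1).map (fun word =>
        PySem.List.pyGetD row (bit + word * wb) 0)) []
    = [] := by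
  rw [← List.flatMap_eq_foldl]
  rcases hdeg with h | h
  · rw [PySem.List.pyRange_one_eq_nil h]; simp
  · simp only [PySem.List.pyRange_one_eq_nil h]; simp

-- A's per-row nested scramble loops = B's word slicing + zip-flatten
theorem scramble_row (wb wpr : Int) (row : List Int)
    (hwbpos : 0 < wb) (hwpr : 0 < wpr) (hle : wb * wpr ≤ (row.length : Int)) :
    (PySem.List.pyRange 0 wb 1).foldl (fun s bit =>
      s ++ (PySem.List.pyRange 0 wpr 1).map (fun word =>
        PySem.List.pyGetD row (bit + word * wb) 0)) []
    = pyZipFlat ((PySem.List.pyRange 0 wpr 1).map (fun w =>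
        PySem.List.slice row (some (w * wb)) (some ((w + 1) * wb)))) := by
  rw [← List.flatMap_eq_foldl]
  -- every word slice is the wb.toNat-length block starting at w*wb
  have hslice : ∀ w ∈ PySem.List.pyRange 0 wpr 1,
      PySem.List.slice row (some (w * wb)) (some ((w + 1) * wb))
      = (row.drop (w * wb).toNat).take wb.toNat := by
    intro w hw
    rw [PySem.List.mem_pyRange_one] at hw
    have h0 : 0 ≤ w * wb := mul_nonneg hw.1 (le_of_lt hwbpos)
    rw [PySem.List.slice_toNat row h0 (by nlinarith)]
    congr 1
    have : (w + 1) * wb = w * wb + wb := by ring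
    omega
  have hwlen : ∀ w ∈ PySem.List.pyRange 0 wpr 1,
      ((row.drop (w * wb).toNat).take wb.toNat).length = wb.toNat := by
    intro w hw
    rw [PySem.List.mem_pyRange_one] at hw
    have h0 : 0 ≤ w * wb := mul_nonneg hw.1 (le_of_lt hwbpos)
    have hup : w * wb + wb ≤ (row.length : Int) := by nlinarith
    simp [List.length_take, List.length_drop]
    omega
  rw [List.map_congr_left hslice]
  rw [pyZipFlat_uniform wb.toNat _
    (by
      have : (0 : Int) ∈ PySem.List.pyRange 0 wpr 1 := by
        rw [PySem.List.mem_pyRange_one]; omega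
      exact List.ne_nil_of_length_pos
        (List.length_pos_of_mem (List.mem_map_of_mem this)))
    (by
      intro v hv
      obtain ⟨w, hw, rfl⟩ := List.mem_map.mp hv
      exact hwlen w hw)]
  -- both sides as flatMap over List.range wb.toNat
  rw [PySem.List.pyRange_one 0 wb]
  simp only [List.flatMap_map, List.map_map, sub_zero]
  apply List.flatMap_congr
  intro b hb
  rw [List.mem_range] at hb
  apply List.map_congr_left
  intro w hw
  rw [PySem.List.mem_pyRange_one] at hw
  have h0 : 0 ≤ w * wb := mul_nonneg hw.1 (le_of_lt hwbpos)
  simp only [Function.comp, zero_add]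
  rw [PySem.List.pyGetD_of_nonneg row 0 (by omega)]
  have hidx : ((b : Int) + w * wb).toNat = (w * wb).toNat + b := by omega
  rw [hidx]
  simp only [List.getD_eq_getElem?_getD, List.getElem?_take, if_pos hb, List.getElem?_drop]

-- A's conditional left-pad equals B's unconditional one (replicate count is 0 when no pad is needed)
theorem pad_eq (cols : Int) (row : List Int) :
    (if (row.length : Int) < cols then
        List.replicate (cols - (row.length : Int)).toNat 0 ++ row
      else row)
    = List.replicate (cols - (row.length : Int)).toNat 0 ++ row := by
  split_ifs with h
  · rfl
  · have : (cols - (row.length : Int)).toNat = 0 := by omega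
    simp [this]

-- ===== VERDICT (by name: the statement is the Claim_ definition above) =====
theorem chunk_data_spec : Claim_equal_chunk_data := by
  intro cols wb wpr raw _ hpre
  obtain ⟨hc0, hP⟩ := hpre
  unfold Spec_chunk_data chunk_data chunk_data_alt
  by_cases hdeg : wb ≤ 0 ∨ wpr ≤ 0
  · simp only [hdeg, if_true, PySem.List.foldl_append_singleton_eq_map, List.nil_append,
      pad_eq, List.map_map]
    apply List.map_congr_left
    intro i _
    exact scramble_nil wb wpr _ hdeg
  · simp only [hdeg, if_false, PySem.List.foldl_append_singleton_eq_map, List.nil_append,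
      pad_eq, List.map_map]
    rcases lt_trichotomy cols 0 with hneg | h0 | hpos
    · rw [pyRange_zero_nonpos raw.length hneg]; simp
    · exact absurd h0 hc0
    · apply List.map_congr_left
      intro i hi
      simp only [Function.comp]
      rw [PySem.List.mem_pyRange_iff_of_pos hpos] at hi
      have hraw : raw ≠ [] := by
        intro hr; subst hr; simp at hi; omega
      have hle : wb * wpr ≤ cols :=
        ((hP hpos hraw).resolve_left (by omega)).resolve_left (by omega)
      have hlen : (((List.replicate (cols - ((PySem.List.slice raw (some i) (some (i + cols))).length : Int)).toNat 0 ++ PySem.List.slice raw (some i) (some (i + cols))).length : Int)) = cols := by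
        rw [PySem.List.slice_toNat raw hi.1 (by omega)]
        simp [List.length_append, List.length_replicate, List.length_take, List.length_drop]
        omega
      exact scramble_row wb wpr _ (by omega) (by omega) (by rw [hlen]; exact hle)
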